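-- pv_equiv track=rewrite | github.com/nowang6/nlp-sample | rnn/Sentimental-Analysis-Movie-VIK.py | encode_words
-- ===== SOURCE A (Python) =====
-- from collections import Counter
--
-- def encode_words(data_pp):
--     words = []
--     for p in data_pp:
--         words.extend(p.split())
--     counts = Counter(words)
--     vocab = sorted(counts, key=counts.get, reverse=True)
--     vocab_to_int = {word: ii for ii, word in enumerate(vocab, 1)}
--     return vocab_to_int
-- ===== SOURCE B (Python) =====
-- def encode_words(data_pp):
--     counts = {}
--     for p in data_pp:
--         for w in p.split():
--             counts[w] = counts.get(w, 0) + 1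
--     buckets = [[] for _ in range(max(counts.values(), default=0) + 1)]
--     for w, c in counts.items():
--         buckets[c].append(w)
--     vocab_to_int = {}
--     idx = 1
--     for bucket in reversed(buckets):
--         for w in bucket:
--             vocab_to_int[w] = idx
--             idx += 1
--     return vocab_to_int
-- ===== Notes on version B (the rewrite author's own statement) =====
-- stated objective: alternative
-- what changed: Replaces sorted(counts, key=counts.get, reverse=True) with a counting sort: words are bucketed by their count and emitted from the highest bucket down, preserving the stable sort's first-insertion tie order.
import Mathlib
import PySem

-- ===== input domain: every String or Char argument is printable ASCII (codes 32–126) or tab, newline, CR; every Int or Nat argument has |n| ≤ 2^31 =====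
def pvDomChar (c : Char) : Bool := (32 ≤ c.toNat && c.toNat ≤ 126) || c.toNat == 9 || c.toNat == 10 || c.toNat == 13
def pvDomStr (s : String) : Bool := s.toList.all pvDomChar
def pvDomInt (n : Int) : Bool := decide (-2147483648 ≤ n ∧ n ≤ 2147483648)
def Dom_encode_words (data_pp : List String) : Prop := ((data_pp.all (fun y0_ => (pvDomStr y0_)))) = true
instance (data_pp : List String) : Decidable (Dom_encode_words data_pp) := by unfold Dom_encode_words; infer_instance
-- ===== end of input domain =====

-- B replaces A's stable comparison sort by frequency with a counting-sort bucket pass (alternative algorithm, same result).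

-- ===== PORT A =====
def encode_words (data_pp : List String) : List (String × Int) :=
  let words := data_pp.foldl (fun acc p => acc ++ PySem.Str.split₀ p) []
  let counts := PySem.Dict.counter words
  let vocab := PySem.List.sorted counts.keys (fun w => counts.getD w 0) true
  ((PySem.List.enumerate vocab 1).foldl
      (fun d q => d.insert q.2 q.1) (PySem.Dict.empty : PySem.Dict String Int)).items

-- ===== PORT B =====
def encode_words_alt (data_pp : List String) : List (String × Int) :=
  let counts := data_pp.foldl (fun d p =>
      (PySem.Str.split₀ p).foldl (fun d w => d.insert w (d.getD w 0 + 1)) d)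
    (PySem.Dict.empty : PySem.Dict String Int)
  let maxc := PySem.List.maxD counts.values (fun v => v) 0
  let buckets0 : List (List String) := List.replicate (maxc + 1).toNat []
  -- buckets[c].append(w): here 0 ≤ c ≤ maxc always holds, so List.set/pyGetD are exact for Python's buckets[c]
  let buckets := counts.items.foldl
      (fun bs q => bs.set q.2.toNat (PySem.List.pyGetD bs q.2 [] ++ [q.1])) buckets0
  (buckets.reverse.foldl (fun st bucket =>
      bucket.foldl (fun (st : PySem.Dict String Int × Int) w => (st.1.insert w st.2, st.2 + 1)) st)
    ((PySem.Dict.empty : PySem.Dict String Int), 1)).1.items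

-- ===== PRECONDITION & SPEC =====
def Spec_encode_words (data_pp : List String) (out : List (String × Int)) : Prop := out = encode_words_alt data_pp
instance (data_pp : List String) (out : List (String × Int)) : Decidable (Spec_encode_words data_pp out) := by unfold Spec_encode_words; infer_instance

-- ===== CLAIM (what is proved, stated in full; the proofs are below) =====
def Claim_equal_encode_words : Prop := ∀ (data_pp : List String), Dom_encode_words data_pp → Spec_encode_words data_pp (encode_words data_pp)

-- ===== LEMMAS AND PROOFS =====

-- x goes in front when it beats every element
lemma pvInsertBy_all_true {α : Type} (before : α → α → Bool) (x : α) (t : List α)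
    (h : ∀ y ∈ t, before x y = true) : PySem.List.insertBy before x t = x :: t := by
  cases t with
  | nil => rfl
  | cons y ys => simp [PySem.List.insertBy, h y (by simp)]

-- x passes a prefix it does not beat
lemma pvInsertBy_append_left {α : Type} (before : α → α → Bool) (x : α) (l t : List α)
    (h : ∀ y ∈ l, before x y = false) :
    PySem.List.insertBy before x (l ++ t) = l ++ PySem.List.insertBy before x t := by
  induction l with
  | nil => rfl
  | cons y ys ih =>
    simp only [List.cons_append, PySem.List.insertBy, h y (by simp)]
    simp only [Bool.false_eq_true, if_false]
    rw [ih (fun z hz => h z (by simp [hz]))]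

-- inserting x into a bucketed list drops it at the end of its own bucket
lemma pvInsertBy_flatMap (key : String → Int) (x : String) (cs : List Int) (F : Int → List String)
    (hcs : cs.Pairwise (· > ·)) (hx : key x ∈ cs)
    (hF : ∀ c ∈ cs, ∀ w ∈ F c, key w = c) :
    PySem.List.insertBy (fun a b => decide (key b < key a)) x (cs.flatMap F)
      = cs.flatMap (fun c => F c ++ if key x = c then [x] else []) := by
  induction cs with
  | nil => simp at hx
  | cons c cs ih =>
    have hgt : ∀ c' ∈ cs, c' < c := fun c' hc' => (List.pairwise_cons.1 hcs).1 c' hc'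
    have hcs' := (List.pairwise_cons.1 hcs).2
    by_cases hxc : key x = c
    · -- pass through F c, then go in front of the rest
      rw [List.flatMap_cons, pvInsertBy_append_left _ _ _ _ (by
          intro y hy
          have : key y = c := hF c (by simp) y hy
          simp [this, hxc])]
      rw [pvInsertBy_all_true _ _ _ (by
          intro y hy
          obtain ⟨c', hc', hyF⟩ := List.mem_flatMap.1 hy
          have : key y = c' := hF c' (by simp [hc']) y hyF
          simp [this, hxc]
          exact hgt c' hc')]
      rw [List.flatMap_cons]
      have : cs.flatMap (fun c' => F c' ++ if key x = c' then [x] else []) = cs.flatMap F := by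
        apply List.flatMap_congr
        intro c' hc'
        have : key x ≠ c' := by have := hgt c' hc'; omega
        simp [this]
      rw [this]
      simp [hxc]
    · have hx' : key x ∈ cs := by simpa [hxc] using hx
      have hlt : key x < c := hgt _ hx'
      rw [List.flatMap_cons, pvInsertBy_append_left _ _ _ _ (by
          intro y hy
          have : key y = c := hF c (by simp) y hy
          simp [this]
          omega)]
      rw [ih hcs' hx' (fun c' hc' => hF c' (by simp [hc']))]
      simp [hxc]

-- the stable reverse sort IS the bucket concatenation, for any strictly descending cover cs
lemma pvSorted_rev_eq_flatMap (ws : List String) (key : String → Int) (cs : List Int)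
    (hcs : cs.Pairwise (· > ·)) (hmem : ∀ w ∈ ws, key w ∈ cs) :
    PySem.List.sorted ws key true = cs.flatMap (fun c => ws.filter (fun w => decide (key w = c))) := by
  induction ws using List.reverseRecOn with
  | nil => simp [PySem.List.sorted_rev_eq_foldl_insertBy]
  | append_singleton ws x ih =>
    rw [PySem.List.sorted_rev_eq_foldl_insertBy, List.foldl_append, List.foldl_cons, List.foldl_nil,
        ← PySem.List.sorted_rev_eq_foldl_insertBy,
        ih (fun w hw => hmem w (by simp [hw]))]
    rw [pvInsertBy_flatMap key x cs _ hcs (hmem x (by simp)) (by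
        intro c hc w hw
        have := List.of_mem_filter hw
        simpa using this)]
    apply List.flatMap_congr
    intro c hc
    simp [List.filter_append]
    by_cases h : key x = c <;> simp [h]

-- the bucket-filling loop, elementwise
lemma pvBucketsFold (l : List (String × Int)) (bs : List (List String))
    (hl : ∀ q ∈ l, 0 ≤ q.2 ∧ q.2.toNat < bs.length) :
    (l.foldl (fun bs q => bs.set q.2.toNat (PySem.List.pyGetD bs q.2 [] ++ [q.1])) bs).length = bs.length ∧
    ∀ c : Nat, c < bs.length →
      (l.foldl (fun bs q => bs.set q.2.toNat (PySem.List.pyGetD bs q.2 [] ++ [q.1])) bs).getD c []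
        = bs.getD c [] ++ (l.filter (fun q => decide (q.2 = (c : Int)))).map (·.1) := by
  induction l generalizing bs with
  | nil => simp
  | cons q l ih =>
    obtain ⟨hq0, hqlt⟩ := hl q (by simp)
    set bs' := bs.set q.2.toNat (PySem.List.pyGetD bs q.2 [] ++ [q.1]) with hbs'
    have hlen' : bs'.length = bs.length := by simp [hbs']
    have hl' : ∀ p ∈ l, 0 ≤ p.2 ∧ p.2.toNat < bs'.length := by
      intro p hp; rw [hlen']; exact hl p (by simp [hp])
    obtain ⟨ihlen, ihget⟩ := ih bs' hl'
    constructor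
    · simpa [hlen'] using ihlen
    · intro c hc
      rw [List.foldl_cons, ← hbs', ihget c (by omega)]
      have hget' : bs'.getD c [] = if q.2.toNat = c then bs.getD c [] ++ [q.1] else bs.getD c [] := by
        rw [hbs', PySem.List.pyGetD_of_nonneg _ _ hq0]
        by_cases h : q.2.toNat = c
        · subst h; simp [List.getD_eq_getElem?_getD, List.getElem?_set_self (h := hqlt)]
        · simp [List.getD_eq_getElem?_getD, h]
      have hiff : (q.2 = (c : Int)) ↔ q.2.toNat = c := by omega
      by_cases h : q.2.toNat = c
      · rw [hget', if_pos h, List.filter_cons]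
        simp [hiff.2 h]
      · rw [hget', if_neg h, List.filter_cons]
        have hne : ¬ (q.2 = (c : Int)) := fun hh => h (hiff.1 hh)
        simp [hne]

-- the index-assigning emission loop, as a function of the emitted word order
def pvEmit (l : List String) (st : PySem.Dict String Int × Int) : PySem.Dict String Int × Int :=
  l.foldl (fun st w => (st.1.insert w st.2, st.2 + 1)) st

lemma pvEnumFold_eq_emit (l : List String) (d : PySem.Dict String Int) (i : Int) :
    (PySem.List.enumerate l i).foldl (fun d q => d.insert q.2 q.1) d = (pvEmit l (d, i)).1 := by
  induction l generalizing d i with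
  | nil => rfl
  | cons x xs ih =>
    have he : PySem.List.enumerate (x :: xs) i = (i, x) :: PySem.List.enumerate xs (i + 1) := by
      simp [PySem.List.enumerate, PySem.List.enumerate_eq_zipIdx_map]
    rw [he, List.foldl_cons, ih]
    rfl

-- A's and B's tails agree once both count dicts are Counter(words)
lemma pvMain (words : List String) :
    ((PySem.List.enumerate (PySem.List.sorted (PySem.Dict.counter words).keys
        (fun w => (PySem.Dict.counter words).getD w 0) true) 1).foldl
      (fun d q => d.insert q.2 q.1) (PySem.Dict.empty : PySem.Dict String Int)).items
    = (((PySem.Dict.counter words).items.foldl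
          (fun bs q => bs.set q.2.toNat (PySem.List.pyGetD bs q.2 [] ++ [q.1]))
          (List.replicate ((PySem.List.maxD (PySem.Dict.counter words).values (fun v => v) 0 + 1).toNat)
            ([] : List String))).reverse.foldl
        (fun st bucket =>
          bucket.foldl (fun (st : PySem.Dict String Int × Int) w => (st.1.insert w st.2, st.2 + 1)) st)
        ((PySem.Dict.empty : PySem.Dict String Int), 1)).1.items := by
  set ws := PySem.Set.ofList words with hws
  set cnt : String → Int := fun w => ((words.count w : Nat) : Int) with hcnt
  have hkeys : (PySem.Dict.counter words).keys = ws := PySem.Dict.keys_counter words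
  have hkey : (fun w => (PySem.Dict.counter words).getD w 0) = cnt :=
    funext fun w => PySem.Dict.getD_counter words w
  have hitems : (PySem.Dict.counter words).items = ws.map (fun w => (w, cnt w)) :=
    PySem.Dict.items_counter words
  set maxc := PySem.List.maxD (PySem.Dict.counter words).values (fun v => v) 0 with hmaxc
  have hvals : (PySem.Dict.counter words).values = ws.map cnt := by
    rw [PySem.Dict.values_eq_map_keys _ (PySem.Dict.nodup_keys_counter words) 0, hkeys]
    exact List.map_congr_left (fun w _ => PySem.Dict.getD_counter words w)
  have hmax0 : 0 ≤ maxc := by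
    rw [hmaxc]
    unfold PySem.List.maxD
    cases h : PySem.List.max? (PySem.Dict.counter words).values (fun v => v) with
    | none => simp
    | some m =>
      have hm := PySem.List.max?_mem h
      rw [hvals] at hm
      obtain ⟨w, _, hw⟩ := List.mem_map.1 hm
      simp only [Option.getD_some]
      rw [← hw, hcnt]; positivity
  have hle : ∀ w ∈ ws, cnt w ≤ maxc := by
    intro w hw
    rw [hmaxc]; unfold PySem.List.maxD
    cases h : PySem.List.max? (PySem.Dict.counter words).values (fun v => v) with
    | none =>
      exfalso
      have := (PySem.List.max?_eq_none_iff _ _).1 h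
      rw [hvals] at this
      simp only [List.map_eq_nil_iff] at this
      rw [this] at hw; simp at hw
    | some m =>
      have := PySem.List.max?_isMax h (cnt w) (by rw [hvals]; exact List.mem_map_of_mem hw)
      simpa using this
  set n := (maxc + 1).toNat with hn
  have hcntlt : ∀ w ∈ ws, words.count w < n := by
    intro w hw
    have := hle w hw
    rw [hcnt] at this
    simp only at this
    omega
  -- the descending cover
  set cs : List Int := (List.range n).reverse.map (fun k => ((k : Nat) : Int)) with hcs_def
  have hcs : cs.Pairwise (· > ·) := by
    rw [hcs_def]
    refine List.pairwise_map.2 ?_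
    have : (List.range n).reverse.Pairwise (fun a b => a > b) :=
      List.pairwise_reverse.2 (by simpa using List.pairwise_lt_range)
    exact this.imp (by intro a b h; exact_mod_cast h)
  have hmemcs : ∀ w ∈ ws, cnt w ∈ cs := by
    intro w hw
    rw [hcs_def]
    refine List.mem_map.2 ⟨words.count w, ?_, rfl⟩
    rw [List.mem_reverse, List.mem_range]
    exact hcntlt w hw
  have hvocab : PySem.List.sorted ws cnt true
      = cs.flatMap (fun c => ws.filter (fun w => decide (cnt w = c))) :=
    pvSorted_rev_eq_flatMap ws cnt cs hcs hmemcs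
  -- buckets
  have hl : ∀ q ∈ (PySem.Dict.counter words).items, 0 ≤ q.2 ∧ q.2.toNat < (List.replicate n ([] : List String)).length := by
    intro q hq
    rw [hitems] at hq
    obtain ⟨w, hw, rfl⟩ := List.mem_map.1 hq
    refine ⟨by rw [hcnt]; positivity, ?_⟩
    rw [List.length_replicate, hcnt]
    simpa using hcntlt w hw
  obtain ⟨hblen, hbget⟩ := pvBucketsFold (PySem.Dict.counter words).items (List.replicate n []) hl
  set buckets := (PySem.Dict.counter words).items.foldl
      (fun bs q => bs.set q.2.toNat (PySem.List.pyGetD bs q.2 [] ++ [q.1]))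
      (List.replicate n ([] : List String)) with hbuckets
  have hb : buckets = (List.range n).map (fun (c : Nat) => ws.filter (fun w => decide (cnt w = ((c : Nat) : Int)))) := by
    apply List.ext_getElem
    · rw [hblen]; simp
    · intro c hc1 hc2
      have hcn : c < n := by simpa using hc2
      have h1 : buckets[c] = buckets.getD c [] := by
        rw [List.getD_eq_getElem?_getD, List.getElem?_eq_getElem hc1]; rfl
      rw [h1, hbget c (by simpa using hcn)]
      simp only [List.getElem_map, List.getElem_range]
      rw [hitems, List.filter_map, List.map_map]
      simp [Function.comp_def]
  -- final emission: both sides emit the same word order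
  rw [hkeys, hkey, hvocab, pvEnumFold_eq_emit]
  rw [← List.foldl_flatten (f := fun (st : PySem.Dict String Int × Int) w => (st.1.insert w st.2, st.2 + 1))
        (b := ((PySem.Dict.empty : PySem.Dict String Int), 1)) (L := buckets.reverse)]
  have hflat : buckets.reverse.flatten = cs.flatMap (fun c => ws.filter (fun w => decide (cnt w = c))) := by
    rw [hb, ← List.map_reverse, ← List.flatMap_def, hcs_def, List.flatMap_map]
  show (pvEmit _ _).1.items = (pvEmit buckets.reverse.flatten _).1.items
  rw [hflat]

-- ===== VERDICT (by name: the statement is the Claim_ definition above) =====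
theorem encode_words_spec : Claim_equal_encode_words := by
  intro data_pp _
  have hwords : data_pp.foldl (fun acc p => acc ++ PySem.Str.split₀ p) ([] : List String)
      = data_pp.flatMap (fun p => PySem.Str.split₀ p) := by
    simpa using PySem.List.foldl_append_eq_flatMap (fun p => PySem.Str.split₀ p) data_pp []
  have hcounts : data_pp.foldl (fun d p =>
        (PySem.Str.split₀ p).foldl (fun d w => d.insert w (d.getD w 0 + 1)) d)
      (PySem.Dict.empty : PySem.Dict String Int)
      = PySem.Dict.counter (data_pp.flatMap (fun p => PySem.Str.split₀ p)) := by
    rw [← PySem.Dict.foldl_insert_getD_add_one_eq_counter, List.flatMap_def, List.foldl_flatten,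
        List.foldl_map]
  unfold Spec_encode_words
  simp only [encode_words, encode_words_alt, hwords, hcounts]
  exact pvMain _
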